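-- pv_equiv track=rewrite | github.com/bhj8286/algo | programmers/옹알이1/sol.py | solution
-- ===== SOURCE A (Python) =====
-- def solution(babbling):
--     answer = 0
--     baebae = ["aya", "ye", "woo", "ma"]  # 아기가 발음할 수 있는 것들을 리스트로 따로 작성
--     check_list=[]
--     for i in babbling:
--         for j in baebae:   # => 반복문 실행
--             if j in i:
--                 k = i.replace(j,'_') # => 바로 ''으로 바꾸지 않고 '_'을 넣은 이유: 공백으로 치환시 연속되지 않았던 문자들이 붙게되어 발음할 수 있게 되는 경우 존재
--                 i = k
--                 if i.replace('_','') == '': # 치환을 한 후 최종적으로 '_'를 ''으로 바꿔 주어 판단한다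
--                     check_list.append(i)  # 최종적으로 공백인 것들을 체크리스트에 넣어줌
--     answer = len(check_list) # 갯수를 판단해야하므로 리스트의 길이 출력
--
--
--     return answer
-- ===== SOURCE B (Python) =====
-- def solution(babbling):
--     words = ("aya", "ye", "woo", "ma")
--     def ok(s):
--         i, n = 0, len(s)
--         while i < n:
--             for w in words:
--                 if s.startswith(w, i):
--                     i += len(w)
--                     break
--             else:
--                 return False
--         return True
--     return sum(1 for s in babbling if s and ok(s))
-- ===== Notes on version B (the rewrite author's own statement) =====
-- stated objective: simpler
-- what changed: B replaces A's substring-replace-with-'_'-then-check loop by a direct left-to-right tokenizer that consumes one of the four words at each position (their first letters are distinct, so matching is deterministic).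
-- intended difference: On lists containing an element that is a concatenation of the four words and literal '_' characters (at least one word and at least one '_'), e.g. 'ma_', A counts that element as pronounceable because its placeholder '_' is indistinguishable from input underscores, while B does not count it; B is intended since '_' is not a sound the baby can make. — e.g. on solution(["ma_"]): A returns 1, B returns 0
import Mathlib
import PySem

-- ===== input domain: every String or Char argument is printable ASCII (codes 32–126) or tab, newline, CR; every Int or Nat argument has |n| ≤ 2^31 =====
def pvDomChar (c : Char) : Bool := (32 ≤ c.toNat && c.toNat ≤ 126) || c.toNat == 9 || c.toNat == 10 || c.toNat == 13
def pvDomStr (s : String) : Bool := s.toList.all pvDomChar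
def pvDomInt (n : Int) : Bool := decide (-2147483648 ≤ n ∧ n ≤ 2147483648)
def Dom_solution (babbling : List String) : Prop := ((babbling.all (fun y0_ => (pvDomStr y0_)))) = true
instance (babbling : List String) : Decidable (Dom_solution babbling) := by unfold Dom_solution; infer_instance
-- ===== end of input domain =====

-- B is a direct left-to-right tokenizer over the four words instead of A's replace-with-'_'-then-check passes;
-- return-value equivalence outside D_solution; A mutates nothing.

-- ===== PORT A =====
-- inner body of A's 'for j in baebae' loop, kept as a helper for the fold
def innerStep (st : String × List String) (j : String) : String × List String :=
  if PySem.Str.isIn j st.1 then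
    let k := PySem.Str.replace st.1 j "_"
    if PySem.Str.replace k "_" "" == "" then (k, st.2 ++ [k]) else (k, st.2)
  else st

def solution (babbling : List String) : Int :=
  let baebae : List String := ["aya", "ye", "woo", "ma"]
  let check_list : List String :=
    babbling.foldl (fun check_list i => (baebae.foldl innerStep (i, check_list)).2) []
  (check_list.length : Int)

-- ===== PORT B =====
-- Source B's inner while-loop: at each position try to consume one of the four words (startswith, in order)
def okTokens : List Char → Bool
  | 'a' :: 'y' :: 'a' :: r | 'y' :: 'e' :: r | 'w' :: 'o' :: 'o' :: r | 'm' :: 'a' :: r => okTokens r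
  | l => l.isEmpty

def solution_alt (babbling : List String) : Int :=
  babbling.countP fun s => !s.toList.isEmpty && okTokens s.toList

-- ===== PRECONDITION & SPEC =====
-- wu fuel l = true iff l is a concatenation of the four words and literal '_' characters
def wu : Nat → List Char → Bool
  | _, [] => true
  | 0, _ => false
  | f+1, l => ["aya", "ye", "woo", "ma", "_"].any fun w => w.toList.isPrefixOf l && wu f (l.drop w.length)

-- On lists with an element that is a concatenation of the four words and literal '_' characters (≥1 word, ≥1 '_'),
-- e.g. "ma_", A counts that element (its placeholder '_' is indistinguishable from input underscores) and B does not;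
-- B is intended since '_' is not one of the pronounceable words.
def D_solution (babbling : List String) : Prop :=
  ∃ s ∈ babbling, wu s.toList.length s.toList ∧ '_' ∈ s.toList ∧ s.toList.any (· != '_')
instance (babbling : List String) : Decidable (D_solution babbling) := by unfold D_solution; infer_instance

def Spec_solution (babbling : List String) (out : Int) : Prop := ¬ D_solution babbling → out = solution_alt babbling
instance (babbling : List String) (out : Int) : Decidable (Spec_solution babbling out) := by unfold Spec_solution; infer_instance

def pvDiffWitness_solution : List String := ["ma_"]
def pvDiffWitnessOut_solution : Int × Int := (1, 0)

-- ===== CLAIM (what is proved, stated in full; the proofs are below) =====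
def Claim_unchanged_solution : Prop := ∀ (babbling : List String), Dom_solution babbling → Spec_solution babbling (solution babbling)
def Claim_changed_solution : Prop := Dom_solution (pvDiffWitness_solution) ∧ D_solution (pvDiffWitness_solution) ∧ solution (pvDiffWitness_solution) = pvDiffWitnessOut_solution.1 ∧ solution_alt (pvDiffWitness_solution) = pvDiffWitnessOut_solution.2 ∧ pvDiffWitnessOut_solution.1 ≠ pvDiffWitnessOut_solution.2
def Claim_exact_solution : Prop := ∀ (babbling : List String), Dom_solution babbling → D_solution babbling → solution babbling ≠ solution_alt babbling

-- ===== LEMMAS AND PROOFS =====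

-- the element predicate of B, named for the proofs
def okWord (s : String) : Bool := !s.toList.isEmpty && okTokens s.toList

-- proof-side recursive form of the word-or-underscore decomposition test wu
def mixedU : List Char → Bool
  | [] => true
  | '_' :: rest => mixedU rest
  | 'a' :: 'y' :: 'a' :: rest => mixedU rest
  | 'y' :: 'e' :: rest => mixedU rest
  | 'w' :: 'o' :: 'o' :: rest => mixedU rest
  | 'm' :: 'a' :: rest => mixedU rest
  | _ => false

theorem wu_eq : ∀ (n : Nat) (l : List Char), l.length ≤ n → wu n l = mixedU l := by
  intro n
  induction n with
  | zero =>
    intro l h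
    cases l with
    | nil => rfl
    | cons c t => simp at h
  | succ n ih =>
    intro l h
    cases l with
    | nil => rfl
    | cons c t =>
      show (["aya", "ye", "woo", "ma", "_"].any
        fun w => w.toList.isPrefixOf (c :: t) && wu n ((c :: t).drop w.length)) = mixedU (c :: t)
      simp only [List.any_cons, List.any_nil, Bool.or_false,
        show ("aya" : String).length = 3 from rfl,
        show ("ye" : String).length = 2 from rfl,
        show ("woo" : String).length = 3 from rfl,
        show ("ma" : String).length = 2 from rfl,
        show ("_" : String).length = 1 from rfl,
        show ("aya" : String).toList = ['a','y','a'] from rfl,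
        show ("ye" : String).toList = ['y','e'] from rfl,
        show ("woo" : String).toList = ['w','o','o'] from rfl,
        show ("ma" : String).toList = ['m','a'] from rfl,
        show ("_" : String).toList = ['_'] from rfl]
      rw [mixedU.eq_def]
      split
      · rename_i heq
        exact absurd heq (by simp)
      · rename_i rest heq
        injection heq with hc ht
        subst hc; subst ht
        simp [List.isPrefixOf]
        exact ih t (by simpa using h)
      · rename_i rest heq
        injection heq with hc ht
        subst hc; subst ht
        simp [List.isPrefixOf]
        exact ih rest (by simp at h; omega)
      · rename_i rest heq
        injection heq with hc ht
        subst hc; subst ht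
        simp [List.isPrefixOf]
        exact ih rest (by simp at h; omega)
      · rename_i rest heq
        injection heq with hc ht
        subst hc; subst ht
        simp [List.isPrefixOf]
        exact ih rest (by simp at h; omega)
      · rename_i rest heq
        injection heq with hc ht
        subst hc; subst ht
        simp [List.isPrefixOf]
        exact ih rest (by simp at h; omega)
      · rename_i h0 h1 h2 h3 h4 h5
        have hc : ¬ (List.isPrefixOf ['_'] (c :: t)) = true := by
          intro hp
          obtain ⟨u, hu⟩ := List.isPrefixOf_iff_prefix.mp hp
          simp only [List.cons_append, List.nil_append] at hu
          exact h1 u hu.symm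
        have p1 : ¬ (List.isPrefixOf ['a','y','a'] (c :: t)) = true := by
          intro hp
          obtain ⟨u, hu⟩ := List.isPrefixOf_iff_prefix.mp hp
          simp only [List.cons_append, List.nil_append] at hu
          exact h2 u hu.symm
        have p2 : ¬ (List.isPrefixOf ['y','e'] (c :: t)) = true := by
          intro hp
          obtain ⟨u, hu⟩ := List.isPrefixOf_iff_prefix.mp hp
          simp only [List.cons_append, List.nil_append] at hu
          exact h3 u hu.symm
        have p3 : ¬ (List.isPrefixOf ['w','o','o'] (c :: t)) = true := by
          intro hp
          obtain ⟨u, hu⟩ := List.isPrefixOf_iff_prefix.mp hp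
          simp only [List.cons_append, List.nil_append] at hu
          exact h4 u hu.symm
        have p4 : ¬ (List.isPrefixOf ['m','a'] (c :: t)) = true := by
          intro hp
          obtain ⟨u, hu⟩ := List.isPrefixOf_iff_prefix.mp hp
          simp only [List.cons_append, List.nil_append] at hu
          exact h5 u hu.symm
        simp [eq_false_of_ne_true hc, eq_false_of_ne_true p1, eq_false_of_ne_true p2,
          eq_false_of_ne_true p3, eq_false_of_ne_true p4]

-- fuel-free version of PySem.Chars.replace for a nonempty pattern
def rep (o : Char) (old new : List Char) : List Char → List Char
  | [] => []
  | c :: t => if (o :: old).isPrefixOf (c :: t) then new ++ rep o old new (t.drop old.length) else c :: rep o old new t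
termination_by l => l.length
decreasing_by all_goals (simp only [List.length_drop, List.length_cons]; omega)

theorem go_eq_rep (o : Char) (old new : List Char) :
    ∀ (fuel : Nat) (l acc : List Char), l.length ≤ fuel →
      PySem.Chars.replace.go (o :: old) new fuel l acc = acc.reverse ++ rep o old new l := by
  intro fuel
  induction fuel with
  | zero =>
    intro l acc h
    have : l = [] := by cases l <;> simp_all
    subst this
    simp [PySem.Chars.replace.go, rep]
  | succ n ih =>
    intro l acc h
    cases l with
    | nil => simp [PySem.Chars.replace.go, rep]
    | cons c t =>
      rw [PySem.Chars.replace.go]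
      by_cases hp : (o :: old).isPrefixOf (c :: t) = true
      · rw [if_pos hp]
        rw [ih _ _ (by simp only [List.length_cons, List.drop_succ_cons, List.length_drop] at h ⊢; omega)]
        rw [rep, if_pos hp]
        simp [List.drop_succ_cons]
      · rw [if_neg hp]
        rw [ih _ _ (by simp at h ⊢; omega)]
        rw [rep, if_neg hp]
        simp

theorem replace_eq_rep (l : List Char) (o : Char) (old new : List Char) :
    PySem.Chars.replace l (o :: old) new = rep o old new l := by
  rw [PySem.Chars.replace]
  simp [go_eq_rep o old new l.length l [] le_rfl]

-- all characters are '_'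
def und (l : List Char) : Bool := l.all (· == '_')

-- the four replace passes of A
def ra (l : List Char) : List Char := rep 'a' ['y','a'] ['_'] l
def ry (l : List Char) : List Char := rep 'y' ['e'] ['_'] l
def rwoo (l : List Char) : List Char := rep 'w' ['o','o'] ['_'] l
def rma (l : List Char) : List Char := rep 'm' ['a'] ['_'] l

def chain (l : List Char) : List Char := rma (rwoo (ry (ra l)))

theorem strip_nil_iff (l : List Char) : (rep '_' [] [] l = []) ↔ und l = true := by
  induction l with
  | nil => simp [rep, und]
  | cons c t ih =>
    rw [rep]
    by_cases hc : c = '_'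
    · subst hc
      simp [List.isPrefixOf, und] at ih ⊢
      exact ih
    · rw [if_neg (by simp [List.isPrefixOf]; exact fun h => absurd h.symm hc)]
      simp [und, hc]

theorem rep_id_of_not_infix (o : Char) (old new l : List Char) (h : ¬ (o :: old) <:+: l) :
    rep o old new l = l := by
  induction l with
  | nil => simp [rep]
  | cons c t ih =>
    rw [rep, if_neg (by
      intro hp
      exact h (List.IsPrefix.isInfix (List.isPrefixOf_iff_prefix.mp hp)))]
    rw [ih (fun hi => h (List.infix_cons hi))]

theorem rep_cons_of_ne {o c : Char} {old new t : List Char} (h : o ≠ c) :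
    rep o old new (c :: t) = c :: rep o old new t := by
  rw [rep, if_neg (by simp [List.isPrefixOf]; exact fun hoc => absurd hoc (by simpa using h))]

theorem rep_cons_of_prefix {o : Char} {old new : List Char} {c : Char} {t : List Char}
    (h : (o :: old).isPrefixOf (c :: t) = true) :
    rep o old new (c :: t) = new ++ rep o old new (t.drop old.length) := by
  rw [rep, if_pos h]

theorem rep_cons_of_not_prefix {o : Char} {old new : List Char} {c : Char} {t : List Char}
    (h : ¬ (o :: old).isPrefixOf (c :: t) = true) :
    rep o old new (c :: t) = c :: rep o old new t := by
  rw [rep, if_neg h]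

theorem prefix_head {a : Char} {p Y : List Char} (h : (a :: p).isPrefixOf Y = true) :
    Y.head? = some a := by
  cases Y with
  | nil => simp [List.isPrefixOf] at h
  | cons d Z => simp [List.isPrefixOf] at h; simp [h.1]

theorem prefix_head' {a : Char} {p Y : List Char} (h : (a :: p) <+: Y) : Y.head? = some a := by
  obtain ⟨r, hr⟩ := h
  subst hr
  rfl

theorem head?_rep (o : Char) (old l : List Char) :
    (rep o old ['_'] l).head? = l.head? ∨ (rep o old ['_'] l).head? = some '_' := by
  cases l with
  | nil => left; simp [rep]
  | cons c t =>
    rw [rep]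
    by_cases hp : (o :: old).isPrefixOf (c :: t) = true
    · right; rw [if_pos hp]; rfl
    · left; rw [if_neg hp]; rfl

theorem und_cons (c : Char) (t : List Char) : und (c :: t) = ((c == '_') && und t) := by
  simp [und]

theorem ra_ne {c : Char} {t : List Char} (h : ('a':Char) ≠ c) : ra (c :: t) = c :: ra t := rep_cons_of_ne h
theorem ry_ne {c : Char} {t : List Char} (h : ('y':Char) ≠ c) : ry (c :: t) = c :: ry t := rep_cons_of_ne h
theorem rwoo_ne {c : Char} {t : List Char} (h : ('w':Char) ≠ c) : rwoo (c :: t) = c :: rwoo t := rep_cons_of_ne h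
theorem rma_ne {c : Char} {t : List Char} (h : ('m':Char) ≠ c) : rma (c :: t) = c :: rma t := rep_cons_of_ne h

theorem chain_nil : chain [] = [] := by simp [chain, ra, ry, rwoo, rma, rep]

theorem chain_us (t : List Char) : chain ('_' :: t) = '_' :: chain t := by
  simp [chain, ra_ne (by decide : ('a':Char) ≠ '_'), ry_ne (by decide : ('y':Char) ≠ '_'),
    rwoo_ne (by decide : ('w':Char) ≠ '_'), rma_ne (by decide : ('m':Char) ≠ '_')]

theorem ra_aya (t : List Char) : ra ('a' :: 'y' :: 'a' :: t) = '_' :: ra t := by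
  simp only [ra]; rw [rep_cons_of_prefix (by simp [List.isPrefixOf])]; rfl

theorem chain_aya (t : List Char) : chain ('a' :: 'y' :: 'a' :: t) = '_' :: chain t := by
  simp only [chain, ra_aya,
    ry_ne (by decide : ('y':Char) ≠ '_'), rwoo_ne (by decide : ('w':Char) ≠ '_'),
    rma_ne (by decide : ('m':Char) ≠ '_')]

theorem ry_ye (t : List Char) : ry ('y' :: 'e' :: t) = '_' :: ry t := by
  simp only [ry]; rw [rep_cons_of_prefix (by simp [List.isPrefixOf])]; rfl

theorem chain_ye (t : List Char) : chain ('y' :: 'e' :: t) = '_' :: chain t := by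
  simp only [chain, ra_ne (by decide : ('a':Char) ≠ 'y'), ra_ne (by decide : ('a':Char) ≠ 'e'),
    ry_ye, rwoo_ne (by decide : ('w':Char) ≠ '_'), rma_ne (by decide : ('m':Char) ≠ '_')]

theorem rwoo_woo (t : List Char) : rwoo ('w' :: 'o' :: 'o' :: t) = '_' :: rwoo t := by
  simp only [rwoo]; rw [rep_cons_of_prefix (by simp [List.isPrefixOf])]; rfl

theorem chain_woo (t : List Char) : chain ('w' :: 'o' :: 'o' :: t) = '_' :: chain t := by
  simp only [chain, ra_ne (by decide : ('a':Char) ≠ 'w'), ra_ne (by decide : ('a':Char) ≠ 'o'),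
    ry_ne (by decide : ('y':Char) ≠ 'w'), ry_ne (by decide : ('y':Char) ≠ 'o'),
    rwoo_woo, rma_ne (by decide : ('m':Char) ≠ '_')]

theorem rma_ma (t : List Char) : rma ('m' :: 'a' :: t) = '_' :: rma t := by
  simp only [rma]; rw [rep_cons_of_prefix (by simp [List.isPrefixOf])]; rfl

theorem chain_ma (t : List Char) (h : ¬ (['y','a'].isPrefixOf t = true)) :
    chain ('m' :: 'a' :: t) = '_' :: chain t := by
  have hra : ra ('m' :: 'a' :: t) = 'm' :: 'a' :: ra t := by
    rw [ra_ne (by decide : ('a':Char) ≠ 'm')]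
    simp only [ra]
    rw [rep_cons_of_not_prefix (by simpa [List.isPrefixOf] using h)]
  simp only [chain, hra, ry_ne (by decide : ('y':Char) ≠ 'm'), ry_ne (by decide : ('y':Char) ≠ 'a'),
    rwoo_ne (by decide : ('w':Char) ≠ 'm'), rwoo_ne (by decide : ('w':Char) ≠ 'a'),
    rma_ma]

theorem head?_ra (t : List Char) : (ra t).head? = t.head? ∨ (ra t).head? = some '_' :=
  head?_rep 'a' ['y','a'] t

theorem head?_ry_ra (t : List Char) :
    (ry (ra t)).head? = t.head? ∨ (ry (ra t)).head? = some '_' := by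
  rcases head?_rep 'y' ['e'] (ra t) with h | h
  · rcases head?_ra t with h' | h'
    · left; show (rep 'y' ['e'] ['_'] (ra t)).head? = t.head?; rw [h, h']
    · right; show (rep 'y' ['e'] ['_'] (ra t)).head? = some '_'; rw [h, h']
  · right; exact h

theorem head?_z (t : List Char) :
    (rwoo (ry (ra t))).head? = t.head? ∨ (rwoo (ry (ra t))).head? = some '_' := by
  rcases head?_rep 'w' ['o','o'] (ry (ra t)) with h | h
  · rcases head?_ry_ra t with h' | h'
    · left; show (rep 'w' ['o','o'] ['_'] (ry (ra t))).head? = t.head?; rw [h, h']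
    · right; show (rep 'w' ['o','o'] ['_'] (ry (ra t))).head? = some '_'; rw [h, h']
  · right; exact h

theorem chain_eq_mixedU (l : List Char) : und (chain l) = mixedU l := by
  fun_induction mixedU l with
  | case1 => rw [chain_nil]; rfl
  | case2 rest ih => rw [chain_us]; simpa [und_cons] using ih
  | case3 rest ih => rw [chain_aya]; simpa [und_cons] using ih
  | case4 rest ih => rw [chain_ye]; simpa [und_cons] using ih
  | case5 rest ih => rw [chain_woo]; simpa [und_cons] using ih
  | case6 rest ih =>
    by_cases hya : ['y','a'].isPrefixOf rest = true
    · -- rest = 'y' :: 'a' :: v : A's aya-replacement fires across the "ma" boundary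
      have h1 := prefix_head hya
      rcases rest with _ | ⟨d1, r1⟩
      · simp at h1
      · simp at h1; subst h1
        simp [List.isPrefixOf] at hya
        have h2 := prefix_head' hya
        rcases r1 with _ | ⟨d2, r2⟩
        · simp at h2
        · simp at h2; subst h2
          have hra : ra ('m' :: 'a' :: 'y' :: 'a' :: r2) = 'm' :: '_' :: ra r2 := by
            rw [ra_ne (by decide : ('a':Char) ≠ 'm'), ra_aya]
          have : chain ('m' :: 'a' :: 'y' :: 'a' :: r2) = 'm' :: '_' :: rma (rwoo (ry (ra r2))) := by
            simp only [chain, hra, ry_ne (by decide : ('y':Char) ≠ 'm'), ry_ne (by decide : ('y':Char) ≠ '_'),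
              rwoo_ne (by decide : ('w':Char) ≠ 'm'), rwoo_ne (by decide : ('w':Char) ≠ '_')]
            rw [show rma ('m' :: '_' :: rwoo (ry (ra r2))) = 'm' :: rma ('_' :: rwoo (ry (ra r2))) from
              rep_cons_of_not_prefix (by simp [List.isPrefixOf])]
            rw [rma_ne (by decide : ('m':Char) ≠ '_')]
          rw [this]
          simp [und_cons]
          rfl
    · rw [chain_ma rest hya]; simpa [und_cons] using ih
  | case7 x h0 h1 h2 h3 h4 h5 =>
    rcases x with _ | ⟨c, t⟩
    · exact absurd rfl h0
    by_cases hc_ : c = '_'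
    · exact absurd (by rw [hc_]) (h1 t)
    by_cases hca : c = 'a'
    · subst hca
      have hya : ¬ (['y','a'].isPrefixOf t = true) := by
        intro hp
        have hh := prefix_head hp
        rcases t with _ | ⟨d1, r1⟩
        · simp at hh
        · simp at hh; subst hh
          simp [List.isPrefixOf] at hp
          have hh2 := prefix_head' hp
          rcases r1 with _ | ⟨d2, r2⟩
          · simp at hh2
          · simp at hh2; subst hh2
            exact h2 r2 rfl
      have hra : ra ('a' :: t) = 'a' :: ra t := by
        simp only [ra]
        rw [rep_cons_of_not_prefix (by simpa [List.isPrefixOf] using hya)]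
      simp only [chain, hra, ry_ne (by decide : ('y':Char) ≠ 'a'),
        rwoo_ne (by decide : ('w':Char) ≠ 'a'), rma_ne (by decide : ('m':Char) ≠ 'a')]
      simp [und_cons]
    by_cases hcy : c = 'y'
    · subst hcy
      have hhe : t.head? ≠ some 'e' := by
        intro hh
        rcases t with _ | ⟨d, r⟩
        · simp at hh
        · simp at hh; subst hh; exact h3 r rfl
      have hnp : ¬ (['y','e'].isPrefixOf ('y' :: ra t) = true) := by
        intro hp
        simp [List.isPrefixOf] at hp
        have := prefix_head' hp
        rcases head?_ra t with h' | h'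
        · exact hhe (h' ▸ this)
        · rw [this] at h'; simp at h'
      have hchain : chain ('y' :: t) = 'y' :: rma (rwoo (ry (ra t))) := by
        simp only [chain, ra_ne (by decide : ('a':Char) ≠ 'y')]
        rw [show ry ('y' :: ra t) = 'y' :: ry (ra t) from by
          simp only [ry]; exact rep_cons_of_not_prefix hnp]
        rw [rwoo_ne (by decide : ('w':Char) ≠ 'y'), rma_ne (by decide : ('m':Char) ≠ 'y')]
      rw [hchain]; simp [und_cons]
    by_cases hcw : c = 'w'
    · subst hcw
      have hoo : ¬ (['o','o'].isPrefixOf (ry (ra t)) = true) := by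
        intro hp
        have hh := prefix_head hp
        have ht : t.head? = some 'o' := by
          rcases head?_ry_ra t with h' | h'
          · rw [← h', hh]
          · rw [hh] at h'; simp at h'
        rcases t with _ | ⟨d, r⟩
        · simp at ht
        · simp at ht; subst ht
          rw [ra_ne (by decide : ('a':Char) ≠ 'o'), ry_ne (by decide : ('y':Char) ≠ 'o')] at hp
          simp [List.isPrefixOf] at hp
          have hh2 := prefix_head' hp
          have hr : r.head? = some 'o' := by
            rcases head?_ry_ra r with h' | h'
            · rw [← h', hh2]
            · rw [hh2] at h'; simp at h'
          rcases r with _ | ⟨d2, r2⟩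
          · simp at hr
          · simp at hr; subst hr; exact h4 r2 rfl
      have hchain : chain ('w' :: t) = 'w' :: rma (rwoo (ry (ra t))) := by
        simp only [chain, ra_ne (by decide : ('a':Char) ≠ 'w'), ry_ne (by decide : ('y':Char) ≠ 'w')]
        rw [show rwoo ('w' :: ry (ra t)) = 'w' :: rwoo (ry (ra t)) from by
          simp only [rwoo]; exact rep_cons_of_not_prefix (by simpa [List.isPrefixOf] using hoo)]
        rw [rma_ne (by decide : ('m':Char) ≠ 'w')]
      rw [hchain]; simp [und_cons]
    by_cases hcm : c = 'm'
    · subst hcm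
      have hha : t.head? ≠ some 'a' := by
        intro hh
        rcases t with _ | ⟨d, r⟩
        · simp at hh
        · simp at hh; subst hh; exact h5 r rfl
      have hnp : ¬ (['m','a'].isPrefixOf ('m' :: rwoo (ry (ra t))) = true) := by
        intro hp
        simp [List.isPrefixOf] at hp
        have := prefix_head' hp
        rcases head?_z t with h' | h'
        · exact hha (h' ▸ this)
        · rw [this] at h'; simp at h'
      have hchain : chain ('m' :: t) = 'm' :: rma (rwoo (ry (ra t))) := by
        simp only [chain, ra_ne (by decide : ('a':Char) ≠ 'm'), ry_ne (by decide : ('y':Char) ≠ 'm'),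
          rwoo_ne (by decide : ('w':Char) ≠ 'm')]
        simp only [rma]
        exact rep_cons_of_not_prefix hnp
      rw [hchain]; simp [und_cons]
    · have hchain : chain (c :: t) = c :: rma (rwoo (ry (ra t))) := by
        simp only [chain, ra_ne (fun h => hca h.symm), ry_ne (fun h => hcy h.symm),
          rwoo_ne (fun h => hcw h.symm), rma_ne (fun h => hcm h.symm)]
      rw [hchain]; simp [und_cons, hc_]

theorem okTokens_no_und_aux : ∀ (n : Nat) (l : List Char), l.length ≤ n → okTokens l = true → '_' ∉ l := by
  intro n
  induction n with
  | zero =>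
    intro l hlen hok
    have : l = [] := by cases l <;> simp_all
    subst this
    simp
  | succ n ih =>
    intro l hlen hok
    rw [okTokens.eq_def] at hok
    split at hok
    · intro hm
      exact ih _ (by simp only [List.length_cons] at hlen; omega) hok (by simpa using hm)
    · intro hm
      exact ih _ (by simp only [List.length_cons] at hlen; omega) hok (by simpa using hm)
    · intro hm
      exact ih _ (by simp only [List.length_cons] at hlen; omega) hok (by simpa using hm)
    · intro hm
      exact ih _ (by simp only [List.length_cons] at hlen; omega) hok (by simpa using hm)
    · have : _ = ([] : List Char) := List.isEmpty_iff.mp hok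
      subst this
      simp

theorem okTokens_no_underscore (l : List Char) (h : okTokens l = true) : '_' ∉ l :=
  okTokens_no_und_aux l.length l le_rfl h

theorem okTokens_mixedU_aux : ∀ (n : Nat) (l : List Char), l.length ≤ n → okTokens l = true → mixedU l = true := by
  intro n
  induction n with
  | zero =>
    intro l hlen hok
    have : l = [] := by cases l <;> simp_all
    subst this
    rfl
  | succ n ih =>
    intro l hlen hok
    rw [okTokens.eq_def] at hok
    split at hok
    · rename_i r
      show mixedU r = true
      refine ih r ?_ hok
      simp only [List.length_cons] at hlen
      omega
    · rename_i r
      show mixedU r = true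
      refine ih r ?_ hok
      simp only [List.length_cons] at hlen
      omega
    · rename_i r
      show mixedU r = true
      refine ih r ?_ hok
      simp only [List.length_cons] at hlen
      omega
    · rename_i r
      show mixedU r = true
      refine ih r ?_ hok
      simp only [List.length_cons] at hlen
      omega
    · have : _ = ([] : List Char) := List.isEmpty_iff.mp hok
      subst this
      rfl

theorem okTokens_mixedU (l : List Char) (h : okTokens l = true) : mixedU l = true :=
  okTokens_mixedU_aux l.length l le_rfl h

theorem mixedU_eq_okTokens (l : List Char) (h : '_' ∉ l) : mixedU l = okTokens l := by
  fun_induction mixedU l with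
  | case1 => rfl
  | case2 rest ih => exact absurd (by simp) h
  | case3 rest ih => show mixedU rest = _; rw [ih (fun hm => h (by simp [hm]))]; rfl
  | case4 rest ih => show mixedU rest = _; rw [ih (fun hm => h (by simp [hm]))]; rfl
  | case5 rest ih => show mixedU rest = _; rw [ih (fun hm => h (by simp [hm]))]; rfl
  | case6 rest ih => show mixedU rest = _; rw [ih (fun hm => h (by simp [hm]))]; rfl
  | case7 x h0 h1 h2 h3 h4 h5 =>
    rw [okTokens.eq_def]
    split
    · exact absurd rfl (h2 _)
    · exact absurd rfl (h3 _)
    · exact absurd rfl (h4 _)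
    · exact absurd rfl (h5 _)
    · cases x with
      | nil => exact absurd rfl h0
      | cons c t => rfl

theorem rep_id_of_und {o : Char} {old new l : List Char} (ho : o ≠ '_') (h : und l = true) :
    rep o old new l = l := by
  apply rep_id_of_not_infix
  intro hinf
  have hm : o ∈ l := hinf.sublist.subset (by simp)
  unfold und at h
  have := List.all_eq_true.mp h o hm
  simp at this
  exact ho this

theorem isIn_false_of_und {o : Char} {old l : List Char} (ho : o ≠ '_') (h : und l = true) :
    PySem.Chars.isIn (o :: old) l = false := by
  rw [PySem.Chars.isIn_eq_false_iff]
  intro hinf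
  have hm : o ∈ l := hinf.sublist.subset (by simp)
  unfold und at h
  have := List.all_eq_true.mp h o hm
  simp at this
  exact ho this

theorem isIn_true_of_ne {o : Char} {old l : List Char} (h : rep o old ['_'] l ≠ l) :
    PySem.Chars.isIn (o :: old) l = true := by
  by_contra hf
  have hf' : PySem.Chars.isIn (o :: old) l = false := eq_false_of_ne_true hf
  exact h (rep_id_of_not_infix _ _ _ _ ((PySem.Chars.isIn_eq_false_iff _ _).mp hf'))

theorem strip_check (k : String) : (PySem.Str.replace k "_" "" == "") = und k.toList := by
  have hl : (PySem.Str.replace k "_" "").toList = rep '_' [] [] k.toList := by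
    rw [PySem.Str.toList_replace]
    rw [show ("_" : String).toList = ['_'] from rfl, show ("" : String).toList = [] from rfl]
    exact replace_eq_rep _ '_' [] []
  by_cases h : und k.toList = true
  · rw [h]
    simp only [beq_iff_eq]
    rw [← String.toList_inj, hl, show ("" : String).toList = [] from rfl]
    exact (strip_nil_iff _).mpr h
  · rw [eq_false_of_ne_true h]
    simp only [beq_eq_false_iff_ne, ne_eq]
    intro he
    exact h ((strip_nil_iff _).mp (by rw [← hl, he]; rfl))

theorem innerStep_eq (x : String) (acc : List String) (j : String) (o : Char) (old : List Char)
    (hj : j.toList = o :: old) :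
    innerStep (x, acc) j =
      (PySem.Str.replace x j "_",
       acc ++ (if (PySem.Chars.isIn (o :: old) x.toList
                   && und ((PySem.Str.replace x j "_").toList))
               then [PySem.Str.replace x j "_"] else [])) := by
  by_cases hin : PySem.Str.isIn j x = true
  · have hin' : PySem.Chars.isIn (o :: old) x.toList = true := by
      rw [← hj, ← PySem.Str.isIn_eq]; exact hin
    unfold innerStep
    rw [if_pos hin]
    simp only [strip_check, hin', Bool.true_and]
    by_cases hu : und ((PySem.Str.replace x j "_").toList) = true
    · rw [if_pos hu, if_pos hu]
    · rw [if_neg hu, if_neg hu]; simp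
  · have hin' : PySem.Chars.isIn (o :: old) x.toList = false := by
      have h0 := eq_false_of_ne_true hin
      rw [PySem.Str.isIn_eq, hj] at h0; exact h0
    unfold innerStep
    rw [if_neg hin]
    have hrep : PySem.Str.replace x j "_" = x := by
      rw [← String.toList_inj, PySem.Str.toList_replace, hj,
        show ("_" : String).toList = ['_'] from rfl, replace_eq_rep]
      exact rep_id_of_not_infix _ _ _ _ ((PySem.Chars.isIn_eq_false_iff _ _).mp hin')
    rw [hrep, hin']
    simp

theorem fired_count (l : List Char) :
    ((if (PySem.Chars.isIn ['a','y','a'] l && und (ra l)) then 1 else 0) +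
     (if (PySem.Chars.isIn ['y','e'] (ra l) && und (ry (ra l))) then 1 else 0) +
     (if (PySem.Chars.isIn ['w','o','o'] (ry (ra l)) && und (rwoo (ry (ra l)))) then 1 else 0) +
     (if (PySem.Chars.isIn ['m','a'] (rwoo (ry (ra l))) && und (chain l)) then 1 else 0) : Nat)
      = (if (und (chain l) && !und l) then 1 else 0) := by
  by_cases u0 : und l = true
  · have ea : ra l = l := rep_id_of_und (by decide) u0
    have eb : ry (ra l) = l := by rw [ea]; exact rep_id_of_und (by decide) u0
    have ec : rwoo (ry (ra l)) = l := by rw [eb]; exact rep_id_of_und (by decide) u0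
    have ed : chain l = l := by show rma _ = l; rw [ec]; exact rep_id_of_und (by decide) u0
    rw [ed, ec, eb, ea]
    rw [isIn_false_of_und (by decide : ('a':Char) ≠ '_') u0,
        isIn_false_of_und (by decide : ('y':Char) ≠ '_') u0,
        isIn_false_of_und (by decide : ('w':Char) ≠ '_') u0,
        isIn_false_of_und (by decide : ('m':Char) ≠ '_') u0]
    simp [u0]
  · have u0' := eq_false_of_ne_true u0
    by_cases u1 : und (ra l) = true
    · have c1 : PySem.Chars.isIn ['a','y','a'] l = true :=
        isIn_true_of_ne (fun he => u0 ((show ra l = l from he) ▸ u1))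
      have e2 : ry (ra l) = ra l := rep_id_of_und (by decide) u1
      have e3 : rwoo (ry (ra l)) = ra l := by rw [e2]; exact rep_id_of_und (by decide) u1
      have e4 : chain l = ra l := by show rma _ = _; rw [e3]; exact rep_id_of_und (by decide) u1
      rw [c1, e4, e3, e2]
      rw [isIn_false_of_und (by decide : ('y':Char) ≠ '_') u1,
          isIn_false_of_und (by decide : ('w':Char) ≠ '_') u1,
          isIn_false_of_und (by decide : ('m':Char) ≠ '_') u1]
      simp [u1, u0']
    · have u1' := eq_false_of_ne_true u1
      by_cases u2 : und (ry (ra l)) = true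
      · have c2 : PySem.Chars.isIn ['y','e'] (ra l) = true :=
          isIn_true_of_ne (fun he => u1 ((show ry (ra l) = ra l from he) ▸ u2))
        have e3 : rwoo (ry (ra l)) = ry (ra l) := rep_id_of_und (by decide) u2
        have e4 : chain l = ry (ra l) := by show rma _ = _; rw [e3]; exact rep_id_of_und (by decide) u2
        rw [c2, e4, e3]
        rw [isIn_false_of_und (by decide : ('w':Char) ≠ '_') u2,
            isIn_false_of_und (by decide : ('m':Char) ≠ '_') u2]
        simp [u1', u2, u0']
      · have u2' := eq_false_of_ne_true u2
        by_cases u3 : und (rwoo (ry (ra l))) = true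
        · have c3 : PySem.Chars.isIn ['w','o','o'] (ry (ra l)) = true :=
            isIn_true_of_ne (fun he => u2 ((show rwoo (ry (ra l)) = ry (ra l) from he) ▸ u3))
          have e4 : chain l = rwoo (ry (ra l)) := by
            show rma _ = _; exact rep_id_of_und (by decide) u3
          rw [c3, e4]
          rw [isIn_false_of_und (by decide : ('m':Char) ≠ '_') u3]
          simp [u1', u2', u3, u0']
        · have u3' := eq_false_of_ne_true u3
          by_cases u4 : und (chain l) = true
          · have c4 : PySem.Chars.isIn ['m','a'] (rwoo (ry (ra l))) = true :=
              isIn_true_of_ne (fun he => u3 ((show chain l = rwoo (ry (ra l)) from he) ▸ u4))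
            rw [c4]
            simp [u1', u2', u3', u4, u0']
          · simp [u1', u2', u3', eq_false_of_ne_true u4]

theorem inner_snd_len (x : String) (acc : List String) :
    ((List.foldl innerStep (x, acc) ["aya", "ye", "woo", "ma"]).2).length
      = acc.length + (if (und (chain x.toList) && !und x.toList) then 1 else 0) := by
  have e1 : (PySem.Str.replace x "aya" "_").toList = ra x.toList := by
    rw [PySem.Str.toList_replace, show ("aya" : String).toList = ['a','y','a'] from rfl,
      show ("_" : String).toList = ['_'] from rfl, replace_eq_rep]
    rfl
  have e2 : (PySem.Str.replace (PySem.Str.replace x "aya" "_") "ye" "_").toList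
      = ry (ra x.toList) := by
    rw [PySem.Str.toList_replace, show ("ye" : String).toList = ['y','e'] from rfl,
      show ("_" : String).toList = ['_'] from rfl, replace_eq_rep, e1]
    rfl
  have e3 : (PySem.Str.replace (PySem.Str.replace (PySem.Str.replace x "aya" "_") "ye" "_") "woo" "_").toList
      = rwoo (ry (ra x.toList)) := by
    rw [PySem.Str.toList_replace, show ("woo" : String).toList = ['w','o','o'] from rfl,
      show ("_" : String).toList = ['_'] from rfl, replace_eq_rep, e2]
    rfl
  have e4 : (PySem.Str.replace (PySem.Str.replace (PySem.Str.replace (PySem.Str.replace x "aya" "_") "ye" "_") "woo" "_") "ma" "_").toList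
      = chain x.toList := by
    rw [PySem.Str.toList_replace, show ("ma" : String).toList = ['m','a'] from rfl,
      show ("_" : String).toList = ['_'] from rfl, replace_eq_rep, e3]
    rfl
  simp only [List.foldl_cons, List.foldl_nil]
  rw [innerStep_eq x acc "aya" 'a' ['y','a'] rfl]
  rw [innerStep_eq _ _ "ye" 'y' ['e'] rfl]
  rw [innerStep_eq _ _ "woo" 'w' ['o','o'] rfl]
  rw [innerStep_eq _ _ "ma" 'm' ['a'] rfl]
  rw [e1, e2, e3, e4]
  simp only [List.length_append, apply_ite List.length, List.length_nil,
    List.length_cons, Nat.zero_add]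
  have := fired_count x.toList
  omega

theorem any_ne_iff (l : List Char) : (l.any (· != '_') = true) ↔ ¬ (l.all (· == '_') = true) := by
  simp [List.any_eq_true, List.all_eq_true]

-- A as a countP
theorem solution_eq_countP (babbling : List String) :
    solution babbling = (babbling.countP (fun s => und (chain s.toList) && !und s.toList) : Int) := by
  have main : ∀ (bs : List String) (acc : List String),
      (bs.foldl (fun check_list i => (List.foldl innerStep (i, check_list) ["aya","ye","woo","ma"]).2) acc).length
        = acc.length + bs.countP (fun s => und (chain s.toList) && !und s.toList) := by
    intro bs
    induction bs with
    | nil => intro acc; simp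
    | cons b bs ih =>
      intro acc
      rw [List.foldl_cons, ih, inner_snd_len, List.countP_cons]
      by_cases hb : (und (chain b.toList) && !und b.toList) = true
      · simp [hb]; omega
      · simp [eq_false_of_ne_true hb]
  show ((babbling.foldl (fun check_list i => (List.foldl innerStep (i, check_list) ["aya","ye","woo","ma"]).2) []).length : Int) = _
  rw [main babbling []]
  simp

-- B as a countP
theorem solution_alt_eq_countP (babbling : List String) :
    solution_alt babbling = (babbling.countP okWord : Int) := rfl

theorem und_of_no_underscore {l : List Char} (h : '_' ∉ l) : und l = l.isEmpty := by
  cases l with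
  | nil => rfl
  | cons c t =>
    rw [und_cons]
    have : ¬ (c == '_') = true := by
      simp only [beq_iff_eq]
      intro hc; exact h (by simp [hc])
    simp [eq_false_of_ne_true this]

-- per-element agreement outside the changed region
theorem elem_eq (s : String)
    (h : ¬(mixedU s.toList = true ∧ '_' ∈ s.toList ∧ ¬ (s.toList.all (· == '_') = true))) :
    (und (chain s.toList) && !und s.toList) = okWord s := by
  rw [chain_eq_mixedU]
  unfold okWord
  by_cases hu : '_' ∈ s.toList
  · have hok : okTokens s.toList = false := by
      by_contra hok
      exact absurd hu (okTokens_no_underscore _ (by simpa using hok))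
    by_cases hund : und s.toList = true
    · rw [hund, hok]; simp
    · have hm : mixedU s.toList = false := by
        by_contra hm
        exact h ⟨by simpa using hm, hu, fun ha => hund ha⟩
      rw [hm, hok]; simp
  · rw [mixedU_eq_okTokens _ hu, und_of_no_underscore hu]
    exact Bool.and_comm _ _

theorem countP_lt_of {α : Type} (p q : α → Bool) :
    ∀ (l : List α), (∀ x ∈ l, q x = true → p x = true) →
      ∀ x0, x0 ∈ l → p x0 = true → q x0 = false → l.countP q < l.countP p := by
  intro l
  induction l with
  | nil => intro _ x0 h0; simp at h0
  | cons a t ih =>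
    intro hpq x0 h0 hp hq
    rw [List.countP_cons, List.countP_cons]
    rcases List.mem_cons.mp h0 with rfl | hmem
    · rw [hp, hq]
      have := List.countP_mono_left (p := q) (q := p) (fun x hx => hpq x (List.mem_cons_of_mem _ hx))
      simp
      omega
    · have hlt := ih (fun x hx => hpq x (List.mem_cons_of_mem _ hx)) x0 hmem hp hq
      by_cases ha : q a = true
      · rw [ha, hpq a (List.mem_cons_self ..) ha]
        simp
        omega
      · rw [eq_false_of_ne_true ha]
        by_cases ha' : p a = true
        · rw [ha']
          simp
          omega
        · rw [eq_false_of_ne_true ha']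
          simp
          omega

-- ===== VERDICT (by name: the statement is the Claim_ definition above) =====
theorem solution_spec : Claim_unchanged_solution := by
  intro babbling _hDom hND
  rw [solution_eq_countP, solution_alt_eq_countP]
  congr 1
  apply List.countP_congr
  intro s hs
  rw [elem_eq s (fun hbad =>
    hND ⟨s, hs, by rw [wu_eq _ _ le_rfl]; exact hbad.1, hbad.2.1, (any_ne_iff _).mpr hbad.2.2⟩)]

theorem solution_changed : Claim_changed_solution := by
  unfold Claim_changed_solution; decide

theorem solution_tight : Claim_exact_solution := by
  intro babbling _hDom hD
  obtain ⟨s0, hs0, hmixDP, hu, hnund'⟩ := hD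
  have hnund := (any_ne_iff _).mp hnund' 
  have hmix : mixedU s0.toList = true := by rw [← wu_eq _ _ le_rfl]; exact hmixDP
  rw [solution_eq_countP, solution_alt_eq_countP]
  have hlt : babbling.countP okWord
      < babbling.countP (fun s => und (chain s.toList) && !und s.toList) := by
    apply countP_lt_of _ _ babbling
    · intro x _ hq
      unfold okWord at hq
      simp only [Bool.and_eq_true, Bool.not_eq_eq_eq_not, Bool.not_true] at hq
      obtain ⟨h1, hok⟩ := hq
      have hne : ¬ x.toList.isEmpty = true := by simp [h1]
      show (und (chain x.toList) && !und x.toList) = true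
      rw [chain_eq_mixedU, okTokens_mixedU _ hok,
        und_of_no_underscore (okTokens_no_underscore _ hok), eq_false_of_ne_true hne]
      rfl
    · exact hs0
    · show (und (chain s0.toList) && !und s0.toList) = true
      rw [chain_eq_mixedU, hmix, show und s0.toList = false from eq_false_of_ne_true hnund]
      rfl
    · unfold okWord
      have hok : okTokens s0.toList = false := by
        by_contra hok
        exact (okTokens_no_underscore _ (by simpa using hok)) hu
      rw [hok]; simp
  intro he
  have : babbling.countP (fun s => und (chain s.toList) && !und s.toList)
      = babbling.countP okWord := by exact_mod_cast he
  omega
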